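-- pv_equiv track=rewrite | github.com/InnoFang/algo-set | LeetCode/1319. Number of Operations to Make Network Connected/solution.py | makeConnected
-- ===== SOURCE A (Python) =====
-- from typing import List
--
-- def makeConnected(n: int, connections: List[List[int]]) -> int:
--     if n - 1 > len(connections):
--         return -1
--     used = [False] * n
--     edges = [[] for _ in range(n)]
--     for conn in connections:
--         edges[conn[0]].append(conn[1])
--         edges[conn[1]].append(conn[0])
--
--     def dfs(i):
--         used[i] = True
--         for v in edges[i]:
--             if not used[v]:
--                 dfs(v)
--
--     ans = 0
--     for i in range(n):
--         if not used[i]: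
--             dfs(i)
--             ans += 1
--     return ans - 1
-- ===== SOURCE B (Python) =====
-- def makeConnected(n, connections):
--     if n - 1 > len(connections):
--         return -1
--     adj = [[] for _ in range(n)]
--     for c in connections:
--         u, v = c[0], c[1]
--         adj[u].append(v)
--         adj[v].append(u)
--     seen = [False] * n
--     comps = 0
--     for i in range(n):
--         if not seen[i]:
--             comps += 1
--             stack = [i]
--             while stack:
--                 x = stack.pop()
--                 if seen[x]:
--                     continue
--                 seen[x] = True
--                 stack.extend(adj[x])
--     return comps - 1
-- ===== Notes on version B (the rewrite author's own statement) =====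
-- stated objective: alternative
-- what changed: A's recursive DFS is replaced by an iterative explicit-stack flood fill (pop, skip if visited, mark, push neighbours), counting components in the same scan with no recursion.
import Mathlib
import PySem

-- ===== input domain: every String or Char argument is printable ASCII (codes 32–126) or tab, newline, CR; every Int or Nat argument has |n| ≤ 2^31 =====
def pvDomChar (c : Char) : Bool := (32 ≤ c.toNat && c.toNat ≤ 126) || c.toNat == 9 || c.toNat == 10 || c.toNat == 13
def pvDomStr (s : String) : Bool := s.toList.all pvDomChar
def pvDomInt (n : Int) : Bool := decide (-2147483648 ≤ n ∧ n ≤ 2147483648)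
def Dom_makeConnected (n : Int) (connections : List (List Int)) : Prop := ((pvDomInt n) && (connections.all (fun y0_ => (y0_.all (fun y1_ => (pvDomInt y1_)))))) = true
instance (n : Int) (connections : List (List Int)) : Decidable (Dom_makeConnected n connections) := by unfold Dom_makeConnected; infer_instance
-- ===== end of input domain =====

-- B replaces A's recursive DFS over a boolean visited array by an iterative explicit-stack
-- flood fill over a visited set (alternative decomposition, same asymptotic cost).


-- ===== PORT A =====
-- edges[i].append(x); exact for indices Python accepts (incl. negative wrap); no-op where Python raises IndexError (excluded by Pre_)
def pvAppendAt (edges : List (List Int)) (i x : Int) : List (List Int) :=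
  match PySem.List.pyGet? edges i with
  | some l => PySem.List.pySetD edges i (l ++ [x])
  | none => edges

-- the 'for conn in connections' adjacency-building loop of A (conn[0]/conn[1] read via pyGetD;
-- a conn shorter than 2 raises IndexError in Python and is excluded by Pre_)
def pvBuildEdges (n : Int) (connections : List (List Int)) : List (List Int) :=
  connections.foldl
    (fun e conn =>
      pvAppendAt
        (pvAppendAt e (PySem.List.pyGetD conn 0 0) (PySem.List.pyGetD conn 1 0))
        (PySem.List.pyGetD conn 1 0) (PySem.List.pyGetD conn 0 0))
    ((PySem.List.pyRange 0 n 1).map (fun _ => ([] : List Int)))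

-- the recursive dfs of A, with a fuel argument making the recursion structural; the callers
-- pass fuel > number of unvisited entries, so fuel never runs out on inputs satisfying Pre_.
-- 'used[v]' is read with default true (out-of-range v raises in Python; excluded by Pre_).
def pvDfs (edges : List (List Int)) : Nat → List Bool → Int → List Bool
  | 0, used, _ => used
  | fuel+1, used, i =>
      (PySem.List.pyGetD edges i []).foldl
        (fun u v => if PySem.List.pyGetD u v true = false then pvDfs edges fuel u v else u)
        (PySem.List.pySetD used i true)

def makeConnected (n : Int) (connections : List (List Int)) : Int :=
  if n - 1 > (connections.length : Int) then -1
  else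
    let edges := pvBuildEdges n connections
    let p := (PySem.List.pyRange 0 n 1).foldl
      (fun (st : List Bool × Int) i =>
        if PySem.List.pyGetD st.1 i true = false then
          (pvDfs edges (st.1.length + 1) st.1 i, st.2 + 1)
        else st)
      (List.replicate n.toNat false, 0)
    p.2 - 1

-- ===== PORT B =====
-- B's adjacency-building loop (u, v = c[0], c[1])
def pvBuildAdjB (n : Int) (connections : List (List Int)) : List (List Int) :=
  connections.foldl
    (fun e c =>
      let u := PySem.List.pyGetD c 0 0
      let v := PySem.List.pyGetD c 1 0
      pvAppendAt (pvAppendAt e u v) v u)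
    ((PySem.List.pyRange 0 n 1).map (fun _ => ([] : List Int)))

-- lemmas cited by pvFlood's decreasing_by: a successful fresh mark flips one stored
-- False to True, so the count of unvisited entries strictly decreases
theorem pvCountP_false_set_lt {l : List Bool} {k : Nat} (hk : k < l.length)
    (hfalse : l[k] = false) :
    (l.set k true).countP (fun b => !b) < l.countP (fun b => !b) := by
  induction l generalizing k with
  | nil => cases hk
  | cons b bs ih =>
      cases k with
      | zero =>
          simp at hfalse
          subst hfalse
          simp
      | succ k =>
          have hk' : k < bs.length := by simpa using hk
          have hf' : bs[k] = false := by simpa using hfalse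
          have := ih hk' hf'
          simp [List.countP_cons]
          omega

theorem pvFresh_set_lt {seen : List Bool} {x : Int}
    (h : PySem.List.pyGetD seen x true = false) :
    (PySem.List.pySetD seen x true).countP (fun b => !b) < seen.countP (fun b => !b) := by
  unfold PySem.List.pyGetD PySem.List.pyGet? at h
  unfold PySem.List.pySetD PySem.List.pySet?
  cases hk : PySem.List.pyIdx? seen.length x with
  | none => rw [hk] at h; simp at h
  | some k =>
      rw [hk] at h
      simp only [Option.bind_some] at h
      cases hsk : seen[k]? with
      | none => rw [hsk] at h; simp at h
      | some b =>
          rw [hsk] at h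
          simp at h
          have hklt : k < seen.length := (List.getElem?_eq_some_iff.1 hsk).1
          have hkv : seen[k] = false := by
            have := (List.getElem?_eq_some_iff.1 hsk).2
            rw [this, h]
          simpa using pvCountP_false_set_lt hklt hkv

-- the 'while stack:' loop of B; the Lean stack keeps its top at the HEAD (Python pops from the
-- end and extends at the end, hence the .reverse on the pushed adjacency list).  For a fresh
-- stack element outside [-n, n) Python raises IndexError on seen[x]; such elements never arise
-- under Pre_, and the port stops there.
def pvFlood (n : Int) (adj : List (List Int)) (seen : List Bool) (stack : List Int) :
    List Bool :=
  match stack with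
  | [] => seen
  | x :: rest =>
      if PySem.List.pyGetD seen x true = true then pvFlood n adj seen rest
      else if _h : -n ≤ x ∧ x < n then
        pvFlood n adj (PySem.List.pySetD seen x true) ((PySem.List.pyGetD adj x []).reverse ++ rest)
      else seen
termination_by (seen.countP (fun b => !b), stack.length)
decreasing_by
  · apply Prod.Lex.right' <;> simp
  · apply Prod.Lex.left
    exact pvFresh_set_lt (by
      rename_i hg
      cases hv : PySem.List.pyGetD seen x true with
      | false => rfl
      | true => exact absurd hv hg)

def makeConnected_alt (n : Int) (connections : List (List Int)) : Int :=
  if n - 1 > (connections.length : Int) then -1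
  else
    let adj := pvBuildAdjB n connections
    let p := (PySem.List.pyRange 0 n 1).foldl
      (fun (st : List Bool × Int) i =>
        if PySem.List.pyGetD st.1 i true = false then
          (pvFlood n adj st.1 [i], st.2 + 1)
        else st)
      (List.replicate n.toNat false, 0)
    p.2 - 1

-- ===== PRECONDITION & SPEC =====
-- Pre_ excludes exactly the inputs on which A raises: unless the early n-1 > len guard fires
-- (A returns -1 without reading the connections), a connection with fewer than two entries,
-- or an endpoint outside [-n, n), raises IndexError in Python.
def Pre_makeConnected (n : Int) (connections : List (List Int)) : Prop :=
  n - 1 > (connections.length : Int) ∨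
    ∀ c ∈ connections, 2 ≤ c.length ∧ -n ≤ c.getD 0 0 ∧ c.getD 0 0 < n ∧ -n ≤ c.getD 1 0 ∧ c.getD 1 0 < n
instance (n : Int) (connections : List (List Int)) : Decidable (Pre_makeConnected n connections) := by
  unfold Pre_makeConnected; infer_instance

def pvWitness_makeConnected : Int × List (List Int) := (3, [[0, 1]])

def Spec_makeConnected (n : Int) (connections : List (List Int)) (out : Int) : Prop := out = makeConnected_alt n connections
instance (n : Int) (connections : List (List Int)) (out : Int) : Decidable (Spec_makeConnected n connections out) := by unfold Spec_makeConnected; infer_instance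

-- ===== CLAIM (what is proved, stated in full; the proofs are below) =====
def Claim_equal_makeConnected : Prop := ∀ (n : Int) (connections : List (List Int)), Dom_makeConnected n connections → Pre_makeConnected n connections → Spec_makeConnected n connections (makeConnected n connections)

-- ===== LEMMAS AND PROOFS =====

theorem pvCountP_lt_of_flip {l : List Int} {p q : Int → Bool}
    (h1 : ∀ a ∈ l, q a = true → p a = true) (x : Int) (hx : x ∈ l)
    (hpx : p x = true) (hqx : q x = false) : l.countP q < l.countP p := by
  obtain ⟨l1, l2, rfl⟩ := List.append_of_mem hx
  have m1 : l1.countP q ≤ l1.countP p := by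
    apply List.countP_mono_left; intro a ha; exact h1 a (by simp [ha])
  have m2 : l2.countP q ≤ l2.countP p := by
    apply List.countP_mono_left; intro a ha; exact h1 a (by simp [ha])
  simp [List.countP_append, hpx, hqx]
  omega

-- canonical index and validity predicates (Python wraps a negative index by adding n)
def pvC (n v : Int) : Int := if v < 0 then v + n else v

def pvInR (n v : Int) : Prop := 0 ≤ v ∧ v < n

def pvInW (n v : Int) : Prop := -n ≤ v ∧ v < n

theorem pvC_inR {n v : Int} (h : pvInW n v) : pvInR n (pvC n v) := by
  unfold pvInW at h; unfold pvInR pvC; split <;> omega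

theorem pvC_id {n v : Int} (h : pvInR n v) : pvC n v = v := by
  unfold pvInR at h; unfold pvC; rw [if_neg (by omega)]

theorem pvInR_inW {n v : Int} (h : pvInR n v) : pvInW n v := by
  unfold pvInR at h; unfold pvInW; omega

-- the adjacency list of node v (Python edges[v])
def pvAdjF (E : List (List Int)) (v : Int) : List Int := PySem.List.pyGetD E v []

-- the canonicalised adjacency function the reachability relation works over
def pvCadj (n : Int) (E : List (List Int)) (j : Int) : List Int := (pvAdjF E j).map (pvC n)

-- the marked-entry reading both ports' guards perform: used[v] with default true
def pvSA (u : List Bool) (v : Int) : Bool := PySem.List.pyGetD u v true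

-- number of in-range unvisited nodes (the fuel measure of pvDfs)
def pvCf (n : Int) (u : List Bool) : Nat :=
  (PySem.List.pyRange 0 n 1).countP (fun j => !(pvSA u j))

theorem pvIdx_eq {n v : Int} (N : Nat) (hN : N = n.toNat) (h : pvInW n v) :
    PySem.List.pyIdx? N v = some (pvC n v).toNat := by
  unfold pvInW at h
  unfold PySem.List.pyIdx? pvC
  split_ifs
  all_goals try (exfalso; omega)
  all_goals congr 1
  all_goals omega

theorem pvGetD_canon {u : List Bool} {n v : Int} (hlen : u.length = n.toNat) (h : pvInW n v) :
    pvSA u v = u.getD (pvC n v).toNat true := by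
  unfold pvSA PySem.List.pyGetD PySem.List.pyGet?
  rw [hlen, pvIdx_eq n.toNat rfl h]
  simp [List.getD_eq_getElem?_getD]

theorem pvSetD_canon {u : List Bool} {n i : Int} (hlen : u.length = n.toNat) (h : pvInW n i) :
    PySem.List.pySetD u i true = u.set (pvC n i).toNat true := by
  unfold PySem.List.pySetD PySem.List.pySet?
  rw [hlen, pvIdx_eq n.toNat rfl h]
  rfl

theorem pvSA_canon {u : List Bool} {n v : Int} (hlen : u.length = n.toNat) (h : pvInW n v) :
    pvSA u v = pvSA u (pvC n v) := by
  rw [pvGetD_canon hlen h, pvGetD_canon hlen (pvInR_inW (pvC_inR h)), pvC_id (pvC_inR h)]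

theorem pvAdjF_canon {E : List (List Int)} {n i : Int} (hElen : E.length = n.toNat)
    (h : pvInW n i) : pvAdjF E i = pvAdjF E (pvC n i) := by
  unfold pvAdjF PySem.List.pyGetD PySem.List.pyGet?
  rw [hElen, pvIdx_eq n.toNat rfl h, pvIdx_eq n.toNat rfl (pvInR_inW (pvC_inR h)),
      pvC_id (pvC_inR h)]

theorem pvCadj_canon {E : List (List Int)} {n i : Int} (hElen : E.length = n.toNat)
    (h : pvInW n i) : pvCadj n E (pvC n i) = pvCadj n E i := by
  unfold pvCadj; rw [← pvAdjF_canon hElen h]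

-- reachability from i through nodes unmarked in S
inductive pvReach (adj : Int → List Int) (S : Int → Bool) : Int → Int → Prop
  | refl (i : Int) : S i = false → pvReach adj S i i
  | step {i j v : Int} : pvReach adj S i j → v ∈ adj j → S v = false → pvReach adj S i v

theorem pvReach_start {adj : Int → List Int} {S : Int → Bool} {i v : Int}
    (h : pvReach adj S i v) : S i = false := by
  induction h with
  | refl h => exact h
  | step _ _ _ ih => exact ih

theorem pvReach_mono {n : Int} {adj : Int → List Int}
    (hadj : ∀ j w, w ∈ adj j → pvInR n w) {S S' : Int → Bool}
    (hss : ∀ w, pvInR n w → S w = true → S' w = true) {i v : Int} (hi : pvInR n i)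
    (h : pvReach adj S' i v) : pvReach adj S i v := by
  induction h with
  | refl h =>
      exact pvReach.refl _ (by
        cases hS : S i with
        | false => rfl
        | true => rw [hss i hi hS] at h; cases h)
  | step hr hm h ih =>
      refine pvReach.step ih hm ?_
      have hv := hadj _ _ hm
      cases hS : S _ with
      | false => rfl
      | true => rw [hss _ hv hS] at h; cases h

theorem pvReach_congr {n : Int} {adj : Int → List Int}
    (hadj : ∀ j w, w ∈ adj j → pvInR n w) {S S' : Int → Bool}
    (heq : ∀ w, pvInR n w → S w = S' w) {i v : Int} (hi : pvInR n i) :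
    pvReach adj S i v ↔ pvReach adj S' i v := by
  constructor
  · exact fun h => pvReach_mono hadj (fun w hw hS => by rw [heq w hw]; exact hS) hi h
  · exact fun h => pvReach_mono hadj (fun w hw hS => by rw [← heq w hw]; exact hS) hi h

theorem pvReach_trans {adj : Int → List Int} {S : Int → Bool} {a b c : Int}
    (h1 : pvReach adj S a b) (h2 : pvReach adj S b c) : pvReach adj S a c := by
  induction h2 with
  | refl _ => exact h1
  | step _ hm h ih => exact pvReach.step ih hm h

-- unfolding one step of reachability after marking the start node
theorem pvReach_unfold {n : Int} {adj : Int → List Int}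
    (hadj : ∀ j w, w ∈ adj j → pvInR n w) {S S' : Int → Bool} {i : Int}
    (hi : pvInR n i) (hSi : S i = false)
    (hS' : ∀ w, pvInR n w → (S' w = true ↔ S w = true ∨ w = i)) {j : Int} :
    pvReach adj S i j ↔ j = i ∨ ∃ v ∈ adj i, pvReach adj S' v j := by
  have hS'false : ∀ w, pvInR n w → S w = false → w ≠ i → S' w = false := by
    intro w hw h1 h2
    cases hS : S' w with
    | false => rfl
    | true =>
        rcases (hS' w hw).1 hS with h | h
        · rw [h1] at h; cases h
        · exact absurd h h2
  constructor
  · intro h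
    induction h with
    | refl _ => exact Or.inl rfl
    | step hr hm h ih =>
        rename_i j' v'
        have hv' : pvInR n v' := hadj _ _ hm
        by_cases hvi : v' = i
        · exact Or.inl hvi
        rcases ih with h1 | ⟨v, hv, hrv⟩
        · subst h1
          exact Or.inr ⟨v', hm, pvReach.refl _ (hS'false _ hv' h hvi)⟩
        · exact Or.inr ⟨v, hv, pvReach.step hrv hm (hS'false _ hv' h hvi)⟩
  · rintro (rfl | ⟨v, hv, hrv⟩)
    · exact pvReach.refl _ hSi
    · have hvR : pvInR n v := hadj _ _ hv
      have hS'v : S' v = false := pvReach_start hrv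
      have hSv : S v = false := by
        cases hS : S v with
        | false => rfl
        | true => rw [(hS' v hvR).2 (Or.inl hS)] at hS'v; cases hS'v
      have hr1 : pvReach adj S v j :=
        pvReach_mono hadj (fun w hw hS => (hS' w hw).2 (Or.inl hS)) hvR hrv
      exact pvReach_trans (pvReach.step (pvReach.refl _ hSi) hv hSv) hr1

-- absorption: marking everything reachable from x does not change the reachable union
theorem pvReach_absorb {n : Int} {adj : Int → List Int}
    (hadj : ∀ j w, w ∈ adj j → pvInR n w) {S S' : Int → Bool} {x : Int}
    (hS' : ∀ w, pvInR n w → (S' w = true ↔ S w = true ∨ pvReach adj S x w))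
    {w0 j : Int} (hw0 : pvInR n w0) (h : pvReach adj S w0 j) :
    pvReach adj S' w0 j ∨ pvReach adj S x j := by
  induction h with
  | refl h =>
      cases hS : S' _ with
      | false => exact Or.inl (pvReach.refl _ hS)
      | true =>
          rcases (hS' _ hw0).1 hS with h1 | h1
          · rw [h1] at h; cases h
          · exact Or.inr h1
  | step hr hm h ih =>
      rename_i j' v'
      have hv' : pvInR n v' := hadj _ _ hm
      rcases ih with h1 | h1
      · cases hS : S' v' with
        | false => exact Or.inl (pvReach.step h1 hm hS)
        | true =>
            rcases (hS' _ hv').1 hS with h2 | h2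
            · rw [h2] at h; cases h
            · exact Or.inr h2
      · exact Or.inr (pvReach.step h1 hm h)

-- absorption for a single marked node x
theorem pvReach_absorb_one {n : Int} {adj : Int → List Int}
    (hadj : ∀ j w, w ∈ adj j → pvInR n w) {S S' : Int → Bool} {x : Int}
    (hSx : S x = false)
    (hS' : ∀ w, pvInR n w → (S' w = true ↔ S w = true ∨ w = x))
    {w0 j : Int} (hw0 : pvInR n w0) (h : pvReach adj S w0 j) :
    pvReach adj S' w0 j ∨ pvReach adj S x j := by
  induction h with
  | refl h =>
      by_cases hwx : w0 = x
      · subst hwx; exact Or.inr (pvReach.refl _ hSx)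
      · cases hS : S' w0 with
        | false => exact Or.inl (pvReach.refl _ hS)
        | true =>
            rcases (hS' _ hw0).1 hS with h1 | h1
            · rw [h1] at h; cases h
            · exact absurd h1 hwx
  | step hr hm h ih =>
      rename_i j' v'
      have hv' : pvInR n v' := hadj _ _ hm
      rcases ih with h1 | h1
      · by_cases hvx : v' = x
        · subst hvx; exact Or.inr (pvReach.refl _ hSx)
        · cases hS : S' v' with
          | false => exact Or.inl (pvReach.step h1 hm hS)
          | true =>
              rcases (hS' _ hv').1 hS with h2 | h2
              · rw [h2] at h; cases h
              · exact absurd h2 hvx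
      · exact Or.inr (pvReach.step h1 hm h)

theorem pvSA_set' {u : List Bool} {n i v : Int} (hlen : u.length = n.toNat)
    (hi : pvInW n i) (hv : pvInR n v) :
    pvSA (PySem.List.pySetD u i true) v = if v = pvC n i then true else pvSA u v := by
  have hv' : v.toNat < u.length := by unfold pvInR at hv; omega
  have hci : pvInR n (pvC n i) := pvC_inR hi
  have hci' : (pvC n i).toNat < u.length := by unfold pvInR at hci; omega
  unfold pvSA
  rw [pvSetD_canon hlen hi, PySem.List.pyGetD_of_nonneg _ true hv.1,
      PySem.List.pyGetD_of_nonneg _ true hv.1]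
  by_cases h : v = pvC n i
  · rw [if_pos h, h]
    simp [List.getD_eq_getElem?_getD, List.getElem?_set_self hci']
  · have hne : (pvC n i).toNat ≠ v.toNat := by
      unfold pvInR at hv hci; omega
    simp [List.getD_eq_getElem?_getD, List.getElem?_set_ne hne, h]

-- marking a fresh in-window node strictly decreases the unvisited count
theorem pvCf_set_lt {u : List Bool} {n i : Int} (hlen : u.length = n.toNat)
    (hi : pvInW n i) (hfresh : pvSA u i = false) :
    pvCf n (PySem.List.pySetD u i true) < pvCf n u := by
  have hfreshC : pvSA u (pvC n i) = false := by rw [← pvSA_canon hlen hi]; exact hfresh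
  apply pvCountP_lt_of_flip (x := pvC n i)
  · intro a ha hq
    simp only [Bool.not_eq_true'] at hq ⊢
    have haR : pvInR n a := by
      rcases PySem.List.mem_pyRange_one.1 ha with ⟨h1, h2⟩; exact ⟨h1, h2⟩
    rw [pvSA_set' hlen hi haR] at hq
    by_cases h : a = pvC n i
    · simp [h] at hq
    · simpa [h] using hq
  · have := pvC_inR hi
    exact PySem.List.mem_pyRange_one.2 ⟨this.1, this.2⟩
  · simp [hfreshC]
  · rw [pvSA_set' hlen hi (pvC_inR hi)]; simp

theorem pvCf_pos {u : List Bool} {n i : Int} (hlen : u.length = n.toNat)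
    (hi : pvInW n i) (hfresh : pvSA u i = false) : 0 < pvCf n u := by
  have hfreshC : pvSA u (pvC n i) = false := by rw [← pvSA_canon hlen hi]; exact hfresh
  unfold pvCf
  rw [List.countP_pos_iff]
  have := pvC_inR hi
  exact ⟨pvC n i, PySem.List.mem_pyRange_one.2 ⟨this.1, this.2⟩, by simp [hfreshC]⟩

-- a list fetched by pvAdjF is one of the built lists (or empty), so its members are in range
theorem pvAdjF_range {E : List (List Int)} {P : Int → Prop}
    (hmem : ∀ l ∈ E, ∀ v ∈ l, P v) : ∀ j w, w ∈ pvAdjF E j → P w := by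
  intro j w hw
  unfold pvAdjF PySem.List.pyGetD at hw
  cases hg : PySem.List.pyGet? E j with
  | none => rw [hg] at hw; cases hw
  | some l =>
      rw [hg] at hw
      exact hmem l (PySem.List.mem_of_pyGet?_eq_some E hg) w hw

theorem pvCadj_range {E : List (List Int)} {n : Int}
    (hmem : ∀ l ∈ E, ∀ v ∈ l, pvInW n v) : ∀ j w, w ∈ pvCadj n E j → pvInR n w := by
  intro j w hw
  rcases List.mem_map.1 hw with ⟨v, hv, rfl⟩
  exact pvC_inR (pvAdjF_range hmem j v hv)

-- the characterisation of A's recursive dfs: it marks exactly what is reachable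
-- through unvisited nodes, provided the fuel dominates the unvisited count
theorem pvDfs_spec {E : List (List Int)} {n : Int}
    (hmem : ∀ l ∈ E, ∀ v ∈ l, pvInW n v) (hElen : E.length = n.toNat) :
    ∀ (fuel : Nat) (u : List Bool) (i : Int), u.length = n.toNat → pvCf n u ≤ fuel →
      pvInW n i → pvSA u i = false →
      (pvDfs E fuel u i).length = n.toNat ∧ pvCf n (pvDfs E fuel u i) ≤ pvCf n u ∧
      (∀ w, pvInR n w → (pvSA (pvDfs E fuel u i) w = true ↔
          pvSA u w = true ∨ pvReach (pvCadj n E) (pvSA u) (pvC n i) w)) := by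
  have hadjC : ∀ j w, w ∈ pvCadj n E j → pvInR n w := pvCadj_range hmem
  intro fuel
  induction fuel with
  | zero =>
      intro u i hlen hcf hi hfresh
      exact absurd hcf (by have := pvCf_pos hlen hi hfresh; omega)
  | succ fuel IH =>
      intro u i hlen hcf hi hfresh
      have hlen1 : (PySem.List.pySetD u i true).length = n.toNat := by
        rw [PySem.List.length_pySetD]; exact hlen
      have hcf1 : pvCf n (PySem.List.pySetD u i true) < pvCf n u := pvCf_set_lt hlen hi hfresh
      have hS1 : ∀ w, pvInR n w →
          (pvSA (PySem.List.pySetD u i true) w = true ↔ pvSA u w = true ∨ w = pvC n i) := by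
        intro w hw
        rw [pvSA_set' hlen hi hw]
        by_cases h : w = pvC n i <;> simp [h]
      have aux : ∀ (vs : List Int), (∀ v ∈ vs, pvInW n v) →
          ∀ (u' : List Bool), u'.length = n.toNat → pvCf n u' ≤ fuel →
          (vs.foldl (fun u v => if PySem.List.pyGetD u v true = false then pvDfs E fuel u v else u) u').length = n.toNat ∧
          pvCf n (vs.foldl (fun u v => if PySem.List.pyGetD u v true = false then pvDfs E fuel u v else u) u') ≤ pvCf n u' ∧
          (∀ w, pvInR n w →
            (pvSA (vs.foldl (fun u v => if PySem.List.pyGetD u v true = false then pvDfs E fuel u v else u) u') w = true ↔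
             pvSA u' w = true ∨ ∃ v ∈ vs.map (pvC n), pvReach (pvCadj n E) (pvSA u') v w)) := by
        intro vs
        induction vs with
        | nil => intro _ u' hl hc; refine ⟨hl, le_refl _, ?_⟩; simp
        | cons v rest ihv =>
            intro hvs u' hl hc
            have hvW : pvInW n v := hvs v (List.mem_cons_self)
            have hvR : pvInR n (pvC n v) := pvC_inR hvW
            have hrest : ∀ v' ∈ rest, pvInW n v' := fun v' hv' => hvs v' (List.mem_cons_of_mem _ hv')
            have hrestC : ∀ v' ∈ rest.map (pvC n), pvInR n v' := by
              intro v' hv'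
              rcases List.mem_map.1 hv' with ⟨v'', hv'', rfl⟩
              exact pvC_inR (hrest v'' hv'')
            simp only [List.foldl_cons, List.map_cons]
            by_cases hg : PySem.List.pyGetD u' v true = false
            · -- v is fresh: recurse into it
              have hdfs := IH u' v hl hc hvW hg
              obtain ⟨hl2, hc2, hchar⟩ := hdfs
              have hres := ihv hrest (pvDfs E fuel u' v) hl2 (le_trans hc2 hc)
              obtain ⟨hl3, hc3, hchar3⟩ := hres
              rw [if_pos hg]
              refine ⟨hl3, le_trans hc3 hc2, ?_⟩
              intro w hw
              rw [hchar3 w hw]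
              constructor
              · rintro (h1 | ⟨v', hv', hr⟩)
                · rcases (hchar w hw).1 h1 with h2 | h2
                  · exact Or.inl h2
                  · exact Or.inr ⟨pvC n v, List.mem_cons_self, h2⟩
                · have hr' : pvReach (pvCadj n E) (pvSA u') v' w :=
                    pvReach_mono hadjC (fun w' hw' hS => (hchar w' hw').2 (Or.inl hS))
                      (hrestC v' hv') hr
                  exact Or.inr ⟨v', List.mem_cons_of_mem _ hv', hr'⟩
              · rintro (h1 | ⟨v', hv', hr⟩)
                · exact Or.inl ((hchar w hw).2 (Or.inl h1))
                · rcases List.mem_cons.1 hv' with rfl | hv'rest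
                  · exact Or.inl ((hchar w hw).2 (Or.inr hr))
                  · rcases pvReach_absorb hadjC (fun w' hw' => hchar w' hw')
                        (hrestC v' hv'rest) hr with h2 | h2
                    · exact Or.inr ⟨v', hv'rest, h2⟩
                    · exact Or.inl ((hchar w hw).2 (Or.inr h2))
            · -- v is already marked: skipped, and nothing is reachable from it
              have hgT : pvSA u' v = true := by
                cases h : pvSA u' v with
                | false => exact absurd h hg
                | true => rfl
              have hgTC : pvSA u' (pvC n v) = true := by
                rw [← pvSA_canon hl hvW]; exact hgT
              have hres := ihv hrest u' hl hc
              obtain ⟨hl3, hc3, hchar3⟩ := hres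
              rw [if_neg hg]
              refine ⟨hl3, hc3, ?_⟩
              intro w hw
              rw [hchar3 w hw]
              constructor
              · rintro (h1 | ⟨v', hv', hr⟩)
                · exact Or.inl h1
                · exact Or.inr ⟨v', List.mem_cons_of_mem _ hv', hr⟩
              · rintro (h1 | ⟨v', hv', hr⟩)
                · exact Or.inl h1
                · rcases List.mem_cons.1 hv' with rfl | hv'rest
                  · rw [pvReach_start hr] at hgTC; cases hgTC
                  · exact Or.inr ⟨v', hv'rest, hr⟩
      have hvs : ∀ v ∈ pvAdjF E i, pvInW n v := fun v hv => pvAdjF_range hmem i v hv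
      have hbody : pvDfs E (fuel+1) u i =
          (pvAdjF E i).foldl
            (fun u v => if PySem.List.pyGetD u v true = false then pvDfs E fuel u v else u)
            (PySem.List.pySetD u i true) := rfl
      obtain ⟨hl3, hc3, hchar3⟩ :=
        aux (pvAdjF E i) hvs (PySem.List.pySetD u i true) hlen1 (by omega)
      rw [hbody]
      refine ⟨hl3, le_trans hc3 (le_of_lt hcf1), ?_⟩
      intro w hw
      have hiR : pvInR n (pvC n i) := pvC_inR hi
      have hfreshC : pvSA u (pvC n i) = false := by rw [← pvSA_canon hlen hi]; exact hfresh
      have hunf := pvReach_unfold hadjC (S := pvSA u) (S' := pvSA (PySem.List.pySetD u i true))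
          hiR hfreshC hS1 (j := w)
      rw [pvCadj_canon hElen hi] at hunf
      have hmaps : (pvAdjF E i).map (pvC n) = pvCadj n E i := rfl
      rw [hchar3 w hw, hS1 w hw, hmaps, hunf]
      tauto

-- the characterisation of B's stack flood fill
theorem pvFlood_spec {n : Int} {E : List (List Int)}
    (hmem : ∀ l ∈ E, ∀ v ∈ l, pvInW n v) (hElen : E.length = n.toNat) :
    ∀ (seen : List Bool) (stack : List Int), seen.length = n.toNat →
      (∀ v ∈ stack, pvInW n v) →
      (pvFlood n E seen stack).length = n.toNat ∧
      ∀ w, pvInR n w → (pvSA (pvFlood n E seen stack) w = true ↔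
        pvSA seen w = true ∨
          ∃ v ∈ stack.map (pvC n), pvReach (pvCadj n E) (pvSA seen) v w) := by
  have hadjC : ∀ j w, w ∈ pvCadj n E j → pvInR n w := pvCadj_range hmem
  intro seen stack
  induction seen, stack using pvFlood.induct n E with
  | case1 seen => intro hl _; rw [pvFlood]; refine ⟨hl, ?_⟩; intro w hw; simp
  | case2 seen x rest hx ih =>
      intro hl hstack
      have hxW : pvInW n x := hstack x List.mem_cons_self
      have hxC : pvSA seen (pvC n x) = true := by
        rw [← pvSA_canon hl hxW]; exact hx
      have hrest : ∀ v ∈ rest, pvInW n v := fun v hv => hstack v (List.mem_cons_of_mem _ hv)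
      obtain ⟨hl3, hchar3⟩ := ih hl hrest
      rw [pvFlood, if_pos hx]
      refine ⟨hl3, ?_⟩
      intro w hw
      rw [hchar3 w hw]
      simp only [List.map_cons]
      constructor
      · rintro (h | ⟨v, hv, hr⟩)
        · exact Or.inl h
        · exact Or.inr ⟨v, List.mem_cons_of_mem _ hv, hr⟩
      · rintro (h | ⟨v, hv, hr⟩)
        · exact Or.inl h
        · rcases List.mem_cons.1 hv with rfl | hv'
          · rw [pvReach_start hr] at hxC; cases hxC
          · exact Or.inr ⟨v, hv', hr⟩
  | case3 seen x rest hx hxW' ih =>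
      intro hl hstack
      have hxW : pvInW n x := ⟨hxW'.1, hxW'.2⟩
      have hxR : pvInR n (pvC n x) := pvC_inR hxW
      have hxfresh : pvSA seen x = false := by
        cases h : pvSA seen x with
        | false => rfl
        | true => exact absurd h hx
      have hxfreshC : pvSA seen (pvC n x) = false := by
        rw [← pvSA_canon hl hxW]; exact hxfresh
      have hl1 : (PySem.List.pySetD seen x true).length = n.toNat := by
        rw [PySem.List.length_pySetD]; exact hl
      have hrest : ∀ v ∈ rest, pvInW n v := fun v hv => hstack v (List.mem_cons_of_mem _ hv)
      have hstack' : ∀ v ∈ (PySem.List.pyGetD E x []).reverse ++ rest, pvInW n v := by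
        intro v hv
        rcases List.mem_append.1 hv with h | h
        · exact pvAdjF_range hmem x v (List.mem_reverse.1 h)
        · exact hrest v h
      have hS' : ∀ w', pvInR n w' →
          (pvSA (PySem.List.pySetD seen x true) w' = true ↔
            pvSA seen w' = true ∨ w' = pvC n x) := by
        intro w' hw'
        rw [pvSA_set' hl hxW hw']
        by_cases h : w' = pvC n x <;> simp [h]
      obtain ⟨hl3, hchar3⟩ := ih hl1 hstack'
      rw [pvFlood, if_neg hx, dif_pos hxW']
      refine ⟨hl3, ?_⟩
      intro w hw
      have hunf := pvReach_unfold hadjC (S := pvSA seen)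
          (S' := pvSA (PySem.List.pySetD seen x true)) hxR hxfreshC hS' (j := w)
      rw [pvCadj_canon hElen hxW] at hunf
      rw [hchar3 w hw]
      simp only [List.map_cons]
      have hmemrev : ∀ v, v ∈ ((PySem.List.pyGetD E x []).reverse ++ rest).map (pvC n) ↔
          v ∈ pvCadj n E x ∨ v ∈ rest.map (pvC n) := by
        intro v
        simp [pvCadj, pvAdjF, List.mem_map]
      constructor
      · rintro (h | ⟨v, hv, hr⟩)
        · rcases (hS' w hw).1 h with h1 | h1
          · exact Or.inl h1
          · exact Or.inr ⟨pvC n x, List.mem_cons_self, hunf.2 (Or.inl h1)⟩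
        · rcases (hmemrev v).1 hv with hva | hvr
          · exact Or.inr ⟨pvC n x, List.mem_cons_self, hunf.2 (Or.inr ⟨v, hva, hr⟩)⟩
          · have hvrR : pvInR n v := by
              rcases List.mem_map.1 hvr with ⟨v'', hv'', rfl⟩
              exact pvC_inR (hrest v'' hv'')
            have hr' : pvReach (pvCadj n E) (pvSA seen) v w :=
              pvReach_mono hadjC (fun w' hw' hS => (hS' w' hw').2 (Or.inl hS)) hvrR hr
            exact Or.inr ⟨v, List.mem_cons_of_mem _ hvr, hr'⟩
      · rintro (h | ⟨v, hv, hr⟩)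
        · exact Or.inl ((hS' w hw).2 (Or.inl h))
        · rcases List.mem_cons.1 hv with rfl | hvr
          · rcases hunf.1 hr with heq | ⟨v', hv', hr'⟩
            · exact Or.inl ((hS' w hw).2 (Or.inr heq))
            · exact Or.inr ⟨v', (hmemrev v').2 (Or.inl hv'), hr'⟩
          · have hvrR : pvInR n v := by
              rcases List.mem_map.1 hvr with ⟨v'', hv'', rfl⟩
              exact pvC_inR (hrest v'' hv'')
            rcases pvReach_absorb_one hadjC (S := pvSA seen) hxfreshC hS' hvrR hr with h1 | h1
            · exact Or.inr ⟨v, (hmemrev v).2 (Or.inr hvr), h1⟩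
            · rcases hunf.1 h1 with heq | ⟨v', hv', hr'⟩
              · exact Or.inl ((hS' w hw).2 (Or.inr heq))
              · exact Or.inr ⟨v', (hmemrev v').2 (Or.inl hv'), hr'⟩
  | case4 seen x rest hx hxW =>
      intro _ hstack
      exact absurd (hstack x List.mem_cons_self) hxW

theorem pvMem_pySetD {α : Type} {e : List α} {i : Int} {y l' : α}
    (h : l' ∈ PySem.List.pySetD e i y) : l' ∈ e ∨ l' = y := by
  unfold PySem.List.pySetD PySem.List.pySet? at h
  cases hk : PySem.List.pyIdx? e.length i with
  | none => rw [hk] at h; simp at h; exact Or.inl h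
  | some k =>
      rw [hk] at h; simp at h
      exact List.mem_or_eq_of_mem_set h

theorem pvAppendAt_inv {e : List (List Int)} {i x : Int} {P : Int → Prop} {N : Nat}
    (hlen : e.length = N) (hmem : ∀ l ∈ e, ∀ v ∈ l, P v) (hx : P x) :
    (pvAppendAt e i x).length = N ∧ ∀ l ∈ pvAppendAt e i x, ∀ v ∈ l, P v := by
  unfold pvAppendAt
  cases hg : PySem.List.pyGet? e i with
  | none => exact ⟨hlen, hmem⟩
  | some l =>
      have hl : l ∈ e := PySem.List.mem_of_pyGet?_eq_some e hg
      refine ⟨by rw [PySem.List.length_pySetD]; exact hlen, ?_⟩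
      intro l' hl' v hv
      rcases pvMem_pySetD hl' with h | rfl
      · exact hmem l' h v hv
      · rcases List.mem_append.1 hv with h | h
        · exact hmem l hl v h
        · rw [List.mem_singleton.1 h]; exact hx

-- the adjacency structure built by A's loop: right length, all entries in the index window
theorem pvBuildEdges_spec {n : Int} {conns : List (List Int)}
    (hpre : ∀ c ∈ conns, 2 ≤ c.length ∧ -n ≤ c.getD 0 0 ∧ c.getD 0 0 < n ∧
      -n ≤ c.getD 1 0 ∧ c.getD 1 0 < n) :
    (pvBuildEdges n conns).length = n.toNat ∧
      ∀ l ∈ pvBuildEdges n conns, ∀ v ∈ l, pvInW n v := by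
  unfold pvBuildEdges
  have hinit : ((PySem.List.pyRange 0 n 1).map (fun _ => ([] : List Int))).length = n.toNat ∧
      ∀ l ∈ (PySem.List.pyRange 0 n 1).map (fun _ => ([] : List Int)), ∀ v ∈ l, pvInW n v := by
    constructor
    · rw [List.length_map, PySem.List.length_pyRange_one]; simp
    · intro l hl v hv
      rcases List.mem_map.1 hl with ⟨_, _, rfl⟩
      cases hv
  revert hinit
  generalize ((PySem.List.pyRange 0 n 1).map (fun _ => ([] : List Int))) = e0
  induction conns generalizing e0 with
  | nil => intro h; exact h
  | cons c rest ihc =>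
      intro h0
      have hc := hpre c List.mem_cons_self
      have hrest := fun c' hc' => hpre c' (List.mem_cons_of_mem _ hc')
      simp only [List.foldl_cons]
      apply ihc hrest
      have hg0 : PySem.List.pyGetD c 0 0 = c.getD 0 0 := PySem.List.pyGetD_zero c 0
      have hg1 : PySem.List.pyGetD c 1 0 = c.getD 1 0 := by
        have := PySem.List.pyGetD_natCast c (n := 1) (d := 0)
        simpa using this
      have hc0 : pvInW n (PySem.List.pyGetD c 0 0) := by rw [hg0]; exact ⟨hc.2.1, hc.2.2.1⟩
      have hc1 : pvInW n (PySem.List.pyGetD c 1 0) := by rw [hg1]; exact ⟨hc.2.2.2.1, hc.2.2.2.2⟩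
      have step1 := pvAppendAt_inv (i := PySem.List.pyGetD c 0 0) h0.1 h0.2 hc1
      exact pvAppendAt_inv (i := PySem.List.pyGetD c 1 0) step1.1 step1.2 hc0

-- both ports build the same adjacency structure
theorem pvBuildAdjB_eq (n : Int) (conns : List (List Int)) :
    pvBuildAdjB n conns = pvBuildEdges n conns := rfl

-- the two top-level scans stay synchronised and produce the same count
theorem pvFold_sync {n : Int} {E : List (List Int)}
    (hmem : ∀ l ∈ E, ∀ v ∈ l, pvInW n v) (hElen : E.length = n.toNat) :
    ∀ (xs : List Int), (∀ i ∈ xs, pvInR n i) →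
    ∀ (used seen : List Bool) (a : Int),
      used.length = n.toNat → seen.length = n.toNat →
      (∀ w, pvInR n w → pvSA used w = pvSA seen w) →
      (xs.foldl (fun (st : List Bool × Int) i =>
          if PySem.List.pyGetD st.1 i true = false then
            (pvDfs E (st.1.length + 1) st.1 i, st.2 + 1)
          else st) (used, a)).2 =
      (xs.foldl (fun (st : List Bool × Int) i =>
          if PySem.List.pyGetD st.1 i true = false then
            (pvFlood n E st.1 [i], st.2 + 1)
          else st) (seen, a)).2 := by
  have hadjC : ∀ j w, w ∈ pvCadj n E j → pvInR n w := pvCadj_range hmem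
  intro xs
  induction xs with
  | nil => intro _ used seen a _ _ _; rfl
  | cons i rest ihx =>
      intro hxs used seen a hlenA hlenB hagree
      have hiR : pvInR n i := hxs i List.mem_cons_self
      have hiW : pvInW n i := pvInR_inW hiR
      have hrestR : ∀ i' ∈ rest, pvInR n i' := fun i' h => hxs i' (List.mem_cons_of_mem _ h)
      simp only [List.foldl_cons]
      have hguard : pvSA used i = pvSA seen i := hagree i hiR
      by_cases hg : pvSA used i = false
      · -- fresh node: both mark its component and increment
        have hgB : pvSA seen i = false := by rw [← hguard]; exact hg
        rw [show (if PySem.List.pyGetD used i true = false then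
              (pvDfs E (used.length + 1) used i, a + 1) else (used, a)) =
            (pvDfs E (used.length + 1) used i, a + 1) from if_pos hg,
          show (if PySem.List.pyGetD seen i true = false then
              (pvFlood n E seen [i], a + 1) else (seen, a)) =
            (pvFlood n E seen [i], a + 1) from if_pos hgB]
        have hcf : pvCf n used ≤ used.length + 1 := by
          have : pvCf n used ≤ (PySem.List.pyRange 0 n 1).length := List.countP_le_length
          rw [PySem.List.length_pyRange_one] at this
          omega
        obtain ⟨hlenA', _, hcharA⟩ :=
          pvDfs_spec hmem hElen (used.length + 1) used i hlenA hcf hiW hg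
        obtain ⟨hlenB', hcharB⟩ := pvFlood_spec hmem hElen seen [i] hlenB
          (by intro v hv; rw [List.mem_singleton.1 hv]; exact hiW)
        apply ihx hrestR _ _ _ hlenA' hlenB'
        intro w hw
        rw [Bool.eq_iff_iff, hcharA w hw, hcharB w hw]
        have hre := pvReach_congr (S := pvSA used) (S' := pvSA seen)
            hadjC (fun w' hw' => hagree w' hw') (pvC_inR hiW) (v := w)
        constructor
        · rintro (h | h)
          · exact Or.inl (by rw [← hagree w hw]; exact h)
          · exact Or.inr ⟨pvC n i, by simp, hre.1 h⟩
        · rintro (h | ⟨v, hv, h⟩)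
          · exact Or.inl (by rw [hagree w hw]; exact h)
          · have : v = pvC n i := by simpa using hv
            rw [this] at h
            exact Or.inr (hre.2 h)
      · -- already visited: both skip
        have hgT : pvSA used i = true := by
          cases h : pvSA used i with
          | false => exact absurd h hg
          | true => rfl
        have hgB : pvSA seen i = true := by rw [← hguard]; exact hgT
        rw [if_neg (by unfold pvSA at hgT; rw [hgT]; simp),
            if_neg (by unfold pvSA at hgB; rw [hgB]; simp)]
        exact ihx hrestR used seen a hlenA hlenB hagree

-- ===== VERDICT (by name: the statement is the Claim_ definition above) =====
theorem makeConnected_spec : Claim_equal_makeConnected := by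
  intro n conns _ hpre
  unfold Spec_makeConnected makeConnected makeConnected_alt
  by_cases hguard : n - 1 > (conns.length : Int)
  · rw [if_pos hguard, if_pos hguard]
  · rw [if_neg hguard, if_neg hguard]
    rcases hpre with hpre | hpre
    · exact absurd hpre hguard
    obtain ⟨hlen, hmem⟩ := pvBuildEdges_spec hpre
    have hxs : ∀ i ∈ PySem.List.pyRange 0 n 1, pvInR n i := by
      intro i hi
      rcases PySem.List.mem_pyRange_one.1 hi with ⟨h1, h2⟩
      exact ⟨h1, h2⟩
    have hsync := pvFold_sync hmem hlen (PySem.List.pyRange 0 n 1) hxs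
      (List.replicate n.toNat false) (List.replicate n.toNat false) 0
      (by simp) (by simp) (fun _ _ => rfl)
    simp only [pvBuildAdjB_eq]
    rw [hsync]
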